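-- pv_equiv track=rewrite | github.com/parkpoomdev/chord_gen_python | generate_midi.py | _format_progression_for_name
-- ===== SOURCE A (Python) =====
-- def _format_progression_for_name(chords: list[str], group: int = 4) -> str:
--     """
--     Format a chord list for use inside a MIDI track name.
--     Example: ["Cmaj7","Am7","Fmaj7","G","Cmaj7","Am7","Fmaj7","G"]
--       -> "Cmaj7 Am7 Fmaj7 G | Cmaj7 Am7 Fmaj7 G"
--     """
--     if not chords:
--         return ""
--     if group <= 0:
--         return " ".join(chords)
--     parts = []
--     for i in range(0, len(chords), group):
--         parts.append(" ".join(chords[i : i + group]))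
--     return " | ".join(parts)
-- ===== SOURCE B (Python) =====
-- def _format_progression_for_name(chords: list[str], group: int = 4) -> str:
--     if not chords:
--         return ""
--     if group <= 0:
--         return " ".join(chords)
--     pieces = [chords[0]]
--     for i in range(1, len(chords)):
--         pieces.append(" | " if i % group == 0 else " ")
--         pieces.append(chords[i])
--     return "".join(pieces)
-- ===== Notes on version B (the rewrite author's own statement) =====
-- stated objective: alternative
-- what changed: Replaces the slice-into-groups + join-of-joins construction with a single flat pass that emits each chord preceded by a position-based separator (" | " when the index is a multiple of group, else " ") and one final join.
import Mathlib
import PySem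

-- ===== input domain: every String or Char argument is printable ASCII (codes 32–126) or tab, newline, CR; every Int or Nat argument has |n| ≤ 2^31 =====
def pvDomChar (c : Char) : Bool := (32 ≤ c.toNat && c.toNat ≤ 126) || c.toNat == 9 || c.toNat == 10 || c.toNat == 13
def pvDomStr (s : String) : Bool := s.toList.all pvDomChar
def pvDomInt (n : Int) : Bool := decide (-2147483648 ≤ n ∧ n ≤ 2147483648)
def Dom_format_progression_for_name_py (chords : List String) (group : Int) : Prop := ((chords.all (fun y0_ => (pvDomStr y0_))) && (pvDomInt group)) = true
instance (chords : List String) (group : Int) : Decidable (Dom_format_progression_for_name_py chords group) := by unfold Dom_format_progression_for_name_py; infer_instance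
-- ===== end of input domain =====

-- B replaces A's slice-into-groups + join-of-joined-groups with a single flat pass emitting an
-- index-based separator (" | " at multiples of group, else " ") before each chord — alternative decomposition, same cost.


-- ===== PORT A =====
def format_progression_for_name_py (chords : List String) (group : Int) : String :=
  if chords = [] then ""
  else if group ≤ 0 then PySem.Str.join " " chords
  else
    let parts := (PySem.List.pyRange 0 (chords.length : Int) group).foldl
      (fun parts i =>
        parts ++ [PySem.Str.join " " (PySem.List.slice chords (some i) (some (i + group)))])
      ([] : List String)
    PySem.Str.join " | " parts

-- ===== PORT B =====
def format_progression_for_name_py_alt (chords : List String) (group : Int) : String :=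
  if chords = [] then ""
  else if group ≤ 0 then PySem.Str.join " " chords
  else
    let pieces := (PySem.List.pyRange 1 (chords.length : Int) 1).foldl
      (fun pieces i =>
        pieces ++ [if PySem.Int.mod i group = 0 then " | " else " ", PySem.List.pyGetD chords i ""])
      [PySem.List.pyGetD chords 0 ""]
    PySem.Str.join "" pieces

-- ===== PRECONDITION & SPEC =====
def Spec_format_progression_for_name_py (chords : List String) (group : Int) (out : String) : Prop := out = format_progression_for_name_py_alt chords group
instance (chords : List String) (group : Int) (out : String) : Decidable (Spec_format_progression_for_name_py chords group out) := by unfold Spec_format_progression_for_name_py; infer_instance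

-- ===== CLAIM (what is proved, stated in full; the proofs are below) =====
def Claim_equal_format_progression_for_name_py : Prop := ∀ (chords : List String) (group : Int), Dom_format_progression_for_name_py chords group → Spec_format_progression_for_name_py chords group (format_progression_for_name_py chords group)

-- ===== LEMMAS AND PROOFS =====

-- A's chunked view: " ".join of each block of gn chords, as a recursive function.
def chunkJoinStr (gn : Nat) : List String → List String
  | [] => []
  | x :: xs => PySem.Str.join " " (x :: xs.take (gn-1)) :: chunkJoinStr gn (xs.drop (gn-1))
termination_by l => l.length
decreasing_by simp

-- B's flat view: separator-then-chord pieces, with the running index carried explicitly.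
def brec (gn : Nat) : List String → Nat → List String
  | [], _ => []
  | x :: xs, j => (if j % gn = 0 then " | " else " ") :: x :: brec gn xs (j+1)

lemma pyRange_pos_nil (a b s : Int) (hab : b ≤ a) (hs : 0 < s) :
    PySem.List.pyRange a b s = [] := by
  rw [PySem.List.pyRange_of_pos a b hs, if_neg (by omega)]
  simp

lemma pyRange_pos_cons (a b s : Int) (hab : a < b) (hs : 0 < s) :
    PySem.List.pyRange a b s = a :: PySem.List.pyRange (a+s) b s := by
  rw [PySem.List.pyRange_of_pos a b hs, PySem.List.pyRange_of_pos (a+s) b hs]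
  by_cases h : a + s < b
  · rw [if_pos hab, if_pos h]
    have hcount : ((b - a + s - 1) / s).toNat = ((b - (a+s) + s - 1) / s).toNat + 1 := by
      have h1 : b - a + s - 1 = (b - (a+s) + s - 1) + 1*s := by ring
      rw [h1, Int.add_mul_ediv_right _ _ (by omega : s ≠ 0)]
      have h2 : 0 ≤ (b - (a+s) + s - 1) / s := Int.ediv_nonneg (by omega) (by omega)
      omega
    rw [hcount, List.range_succ_eq_map]
    simp only [List.map_cons, List.map_map]
    congr 1
    · simp
    · apply List.map_congr_left; intro k _; simp only [Function.comp_apply]; push_cast; ring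
  · rw [if_pos hab, if_neg h]
    have h0 : 0 ≤ b - a - 1 := by omega
    have h1 : b - a - 1 < s := by omega
    have hcount : ((b - a + s - 1) / s).toNat = 1 := by
      have h2 : b - a + s - 1 = (b - a - 1) + 1*s := by ring
      rw [h2, Int.add_mul_ediv_right _ _ (by omega : s ≠ 0)]
      rw [Int.ediv_eq_zero_of_lt h0 h1]; norm_num
    rw [hcount]
    simp

lemma A_bridge (chords : List String) (gn : Nat) (hg : 0 < gn) :
    ∀ k j : Nat, chords.length ≤ j + k →
    (PySem.List.pyRange (j:Int) (chords.length:Int) (gn:Int)).map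
      (fun i => PySem.Str.join " " (PySem.List.slice chords (some i) (some (i + (gn:Int)))))
    = chunkJoinStr gn (chords.drop j) := by
  intro k
  induction k with
  | zero =>
    intro j hj
    have hle : chords.length ≤ j := by omega
    rw [pyRange_pos_nil _ _ _ (by exact_mod_cast hle) (by exact_mod_cast hg),
        List.drop_of_length_le hle]
    simp [chunkJoinStr]
  | succ k ih =>
    intro j hj
    by_cases hlt : j < chords.length
    · obtain ⟨x, xs', hdrop⟩ : ∃ x xs', chords.drop j = x :: xs' := by
        cases h : chords.drop j with
        | nil =>
          exfalso
          have := congrArg List.length h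
          simp at this; omega
        | cons a b => exact ⟨a, b, rfl⟩
      rw [pyRange_pos_cons _ _ _ (by exact_mod_cast hlt) (by exact_mod_cast hg), List.map_cons]
      have hslice : PySem.List.slice chords (some ((j:Nat):Int)) (some (((j:Nat):Int) + ((gn:Nat):Int)))
          = x :: xs'.take (gn-1) := by
        rw [PySem.List.slice_natCast_add, hdrop]
        cases gn with
        | zero => omega
        | succ m => simp
      have hcast : ((j:Nat):Int) + ((gn:Nat):Int) = (((j+gn : Nat)):Int) := by push_cast; ring
      rw [hslice, hcast, ih (j+gn) (by omega)]
      have hdrop2 : chords.drop (j+gn) = xs'.drop (gn-1) := by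
        rw [← List.drop_drop, hdrop]
        cases gn with
        | zero => omega
        | succ m => simp
      rw [hdrop, hdrop2, chunkJoinStr]
    · have hle : chords.length ≤ j := by omega
      rw [pyRange_pos_nil _ _ _ (by exact_mod_cast hle) (by exact_mod_cast hg),
          List.drop_of_length_le hle]
      simp [chunkJoinStr]

lemma B_bridge (chords : List String) (gn : Nat) (_hg : 0 < gn) :
    ∀ k j : Nat, chords.length ≤ j + k →
    (PySem.List.pyRange (j:Int) (chords.length:Int) 1).flatMap
      (fun i => [(if PySem.Int.mod i (gn:Int) = 0 then " | " else " "), PySem.List.pyGetD chords i ""])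
    = brec gn (chords.drop j) j := by
  intro k
  induction k with
  | zero =>
    intro j hj
    have hle : chords.length ≤ j := by omega
    rw [PySem.List.pyRange_one_eq_nil (by exact_mod_cast hle), List.drop_of_length_le hle]
    simp [brec]
  | succ k ih =>
    intro j hj
    by_cases hlt : j < chords.length
    · obtain ⟨x, xs', hdrop⟩ : ∃ x xs', chords.drop j = x :: xs' := by
        cases h : chords.drop j with
        | nil =>
          exfalso
          have := congrArg List.length h
          simp at this; omega
        | cons a b => exact ⟨a, b, rfl⟩
      rw [PySem.List.pyRange_one_cons (by exact_mod_cast hlt), List.flatMap_cons]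
      have hget : PySem.List.pyGetD chords ((j:Nat):Int) "" = x := by
        rw [PySem.List.pyGetD_natCast]
        have : chords[j]? = some x := by
          have h0 : (chords.drop j)[0]? = some x := by rw [hdrop]; rfl
          rw [List.getElem?_drop] at h0
          simpa using h0
        simp [List.getD_eq_getElem?_getD, this]
      have hmod : PySem.Int.mod ((j:Nat):Int) ((gn:Nat):Int) = ((j % gn : Nat) : Int) :=
        PySem.Int.mod_natCast j gn
      have hcast : ((j:Nat):Int) + 1 = (((j+1 : Nat)):Int) := by push_cast; ring
      rw [hget, hmod, hcast, ih (j+1) (by omega)]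
      have hdrop2 : chords.drop (j+1) = xs' := by
        rw [← List.drop_drop, hdrop, List.drop_one, List.tail_cons]
      rw [hdrop, hdrop2, brec]
      simp [Int.natCast_dvd_natCast, Nat.dvd_iff_mod_eq_zero]
    · have hle : chords.length ≤ j := by omega
      rw [PySem.List.pyRange_one_eq_nil (by exact_mod_cast hle), List.drop_of_length_le hle]
      simp [brec]

lemma brec_shift (gn : Nat) : ∀ (xs : List String) (j : Nat), brec gn xs (j+gn) = brec gn xs j := by
  intro xs
  induction xs with
  | nil => intro _; rfl
  | cons x xs ih =>
    intro j
    simp only [brec, Nat.add_mod_right]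
    rw [show j + gn + 1 = (j+1) + gn by omega, ih (j+1)]

lemma brec_append (gn : Nat) : ∀ (u v : List String) (j : Nat),
    brec gn (u ++ v) j = brec gn u j ++ brec gn v (j + u.length) := by
  intro u
  induction u with
  | nil => intro v j; simp [brec]
  | cons x xs ih =>
    intro v j
    simp only [List.cons_append, brec, List.length_cons]
    rw [ih v (j+1), show j + (xs.length + 1) = (j+1) + xs.length by omega]

lemma brec_small (gn : Nat) : ∀ (u : List String) (j : Nat), 1 ≤ j → j + u.length ≤ gn →
    ((brec gn u j).map String.toList).flatten = u.flatMap (fun x => ' ' :: x.toList) := by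
  intro u
  induction u with
  | nil => intro j _ _; simp [brec]
  | cons x xs ih =>
    intro j h1 h2
    have hlt : j < gn := by simp at h2; omega
    have hmod : j % gn = j := Nat.mod_eq_of_lt hlt
    simp only [brec, hmod, if_neg (show ¬ j = 0 by omega), List.map_cons, List.flatten_cons]
    rw [ih (j+1) (by omega) (by simp at h2 ⊢; omega)]
    simp

lemma joinSp : ∀ (cs : List String) (c : String),
    PySem.Chars.join [' '] ((c :: cs).map String.toList)
    = c.toList ++ cs.flatMap (fun x => ' ' :: x.toList) := by
  intro cs
  induction cs with
  | nil => intro c; simp [PySem.Chars.join_singleton]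
  | cons d ds ih =>
    intro c
    rw [List.map_cons, List.map_cons, PySem.Chars.join_cons_cons, ← List.map_cons, ih d]
    simp

lemma main_small (gn : Nat) (hg : 0 < gn) (c : String) (cs : List String) (hcs : cs.length < gn) :
    PySem.Chars.join [' ','|',' '] ((chunkJoinStr gn (c :: cs)).map String.toList)
    = c.toList ++ ((brec gn cs 1).map String.toList).flatten := by
  have hdrop : cs.drop (gn-1) = [] := List.drop_eq_nil_iff.mpr (by omega)
  have htake : cs.take (gn-1) = cs := List.take_of_length_le (by omega)
  rw [chunkJoinStr, hdrop, htake, chunkJoinStr]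
  rw [List.map_cons, List.map_nil, PySem.Chars.join_singleton, PySem.Str.toList_join]
  rw [show (" ":String).toList = [' '] from rfl, joinSp,
      brec_small gn cs 1 (by omega) (by omega)]

lemma main_lemma (gn : Nat) (hg : 0 < gn) :
    ∀ (k : Nat) (c : String) (cs : List String), cs.length ≤ k →
    PySem.Chars.join [' ','|',' '] ((chunkJoinStr gn (c :: cs)).map String.toList)
    = c.toList ++ ((brec gn cs 1).map String.toList).flatten := by
  intro k
  induction k with
  | zero =>
    intro c cs hk
    exact main_small gn hg c cs (by omega)
  | succ k ih =>
    intro c cs hk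
    by_cases hsmall : cs.length < gn
    · exact main_small gn hg c cs hsmall
    · obtain ⟨d, ds, hvds⟩ : ∃ d ds, cs.drop (gn-1) = d :: ds := by
        cases h : cs.drop (gn-1) with
        | nil =>
          exfalso
          have := congrArg List.length h
          simp at this; omega
        | cons a b => exact ⟨a, b, rfl⟩
      cases hcj : chunkJoinStr gn (d :: ds) with
      | nil => rw [chunkJoinStr] at hcj; exact absurd hcj (by simp)
      | cons s2 rest =>
      rw [chunkJoinStr, hvds, hcj, List.map_cons, List.map_cons, PySem.Chars.join_cons_cons,
          ← List.map_cons, ← hcj]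
      have hds_len : ds.length ≤ k := by
        have := congrArg List.length hvds
        simp at this; omega
      rw [ih d ds hds_len]
      rw [PySem.Str.toList_join, show (" ":String).toList = [' '] from rfl, joinSp]
      have hulen : (cs.take (gn-1)).length = gn - 1 := by simp; omega
      conv_rhs => rw [show cs = cs.take (gn-1) ++ cs.drop (gn-1) from (List.take_append_drop _ _).symm,
                      hvds]
      rw [brec_append, hulen, show 1 + (gn-1) = gn by omega, brec, Nat.mod_self]
      rw [show gn + 1 = 1 + gn by omega, brec_shift gn ds 1]
      simp only [List.map_append, List.flatten_append, List.map_cons,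
        List.flatten_cons]
      rw [brec_small gn (cs.take (gn-1)) 1 (by omega) (by omega)]
      simp [List.append_assoc, show (" | ":String).toList = [' ','|',' '] from rfl]

lemma join_nil_flatten (ps : List (List Char)) : PySem.Chars.join [] ps = ps.flatten := by
  induction ps with
  | nil => simp [PySem.Chars.join_nil]
  | cons p ps ih =>
    cases ps with
    | nil => simp [PySem.Chars.join_singleton]
    | cons q r =>
      rw [PySem.Chars.join_cons_cons, ih]
      simp

-- ===== VERDICT (by name: the statement is the Claim_ definition above) =====
theorem format_progression_for_name_py_spec : Claim_equal_format_progression_for_name_py := by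
  intro chords group _dom
  unfold Spec_format_progression_for_name_py format_progression_for_name_py
    format_progression_for_name_py_alt
  by_cases hnil : chords = []
  · simp [hnil]
  · rw [if_neg hnil, if_neg hnil]
    by_cases hle : group ≤ 0
    · rw [if_pos hle, if_pos hle]
    · rw [if_neg hle, if_neg hle]
      have hpos : 0 < group := by omega
      obtain ⟨gn, rfl⟩ : ∃ gn : Nat, group = (gn:Int) :=
        ⟨group.toNat, (Int.toNat_of_nonneg (by omega)).symm⟩
      have hgn : 0 < gn := by exact_mod_cast hpos
      obtain ⟨c, cs, rfl⟩ : ∃ c cs, chords = c :: cs := by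
        cases chords with
        | nil => exact absurd rfl hnil
        | cons a b => exact ⟨a, b, rfl⟩
      simp only []
      have hA : (PySem.List.pyRange 0 (((c::cs).length:Nat):Int) ((gn:Nat):Int)).foldl
          (fun parts i =>
            parts ++ [PySem.Str.join " " (PySem.List.slice (c::cs) (some i) (some (i + (gn:Int))))])
          ([] : List String)
          = chunkJoinStr gn (c::cs) := by
        rw [PySem.List.foldl_append_singleton_eq_map, List.nil_append,
            show (0:Int) = ((0:Nat):Int) from (Nat.cast_zero).symm,
            A_bridge (c::cs) gn hgn (c::cs).length 0 (by omega), List.drop_zero]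
      have hB : (PySem.List.pyRange 1 (((c::cs).length:Nat):Int) 1).foldl
          (fun pieces i =>
            pieces ++ [if PySem.Int.mod i ((gn:Nat):Int) = 0 then " | " else " ",
                       PySem.List.pyGetD (c::cs) i ""])
          [PySem.List.pyGetD (c::cs) 0 ""]
          = c :: brec gn cs 1 := by
        have h1 := B_bridge (c::cs) gn hgn (c::cs).length 1 (by omega)
        simp only [Nat.cast_one] at h1
        rw [PySem.List.foldl_append_eq_flatMap, h1]
        rw [show (c::cs).drop 1 = cs from rfl, PySem.List.pyGetD_ofNat']
        rfl
      rw [hA, hB]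
      simp only [PySem.Str.join]
      congr 1
      rw [show (" | ":String).toList = [' ','|',' '] from rfl,
          show ("":String).toList = [] from rfl, join_nil_flatten,
          List.map_cons, List.flatten_cons,
          main_lemma gn hgn cs.length c cs le_rfl]
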